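-- pv_equiv track=rewrite | github.com/kylew1004/algorithm | kakao/2018_Blind/1차_6번-프렌즈4블록.py | remake_board
-- ===== SOURCE A (Python) =====
-- def remake_board(m, n, board, removed):
--     new_board = [['0'] * n for _ in range(m)]
--
--     for i in range(n):
--         idx1 = m - 1    # board index
--         idx2 = m - 1    # new_board index
--         while idx1 >= 0:
--             if removed[idx1][i] == 0:
--                 new_board[idx2][i] = board[idx1][i]
--                 idx2 -= 1
--             idx1 -= 1
--
--     return new_board
-- ===== SOURCE B (Python) =====
-- def remake_board(m, n, board, removed):
--     cols = []
--     for col in range(n):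
--         kept = [board[i][col] for i in range(m) if removed[i][col] == 0]
--         cols.append(['0'] * (m - len(kept)) + kept)
--     return [[cols[j][i] for j in range(n)] for i in range(m)]
-- ===== Notes on version B (the rewrite author's own statement) =====
-- stated objective: simpler
-- what changed: Replaces A's in-place grid mutation with two descending read/write pointers per column by a functional filter-then-pad decomposition: each column's survivors are collected top-to-bottom, prefixed with the right number of '0' fills derived from the survivor count, and the result is assembled by transposing the padded columns.
import Mathlib
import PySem

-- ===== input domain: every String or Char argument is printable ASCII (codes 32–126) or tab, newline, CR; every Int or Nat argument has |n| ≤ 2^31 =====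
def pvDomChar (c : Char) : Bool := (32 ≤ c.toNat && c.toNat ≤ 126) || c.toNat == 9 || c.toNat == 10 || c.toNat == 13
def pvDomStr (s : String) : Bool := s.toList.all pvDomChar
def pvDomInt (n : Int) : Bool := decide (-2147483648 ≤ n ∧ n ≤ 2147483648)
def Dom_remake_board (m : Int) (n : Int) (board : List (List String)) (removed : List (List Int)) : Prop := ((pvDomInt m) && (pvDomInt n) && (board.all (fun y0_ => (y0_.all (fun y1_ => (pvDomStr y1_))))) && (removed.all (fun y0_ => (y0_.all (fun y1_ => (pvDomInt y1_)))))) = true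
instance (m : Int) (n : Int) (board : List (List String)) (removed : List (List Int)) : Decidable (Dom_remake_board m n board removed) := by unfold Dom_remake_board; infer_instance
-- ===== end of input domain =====

-- B rebuilds each column as filter-survivors-then-pad-with-'0' and transposes, replacing A's
-- two descending read/write pointers; objective: simpler (same O(m·n) cost).

-- ===== PORT A =====
-- the while loop: idx1 descends from m-1; writes go to new_board[idx2][i]
def aWhile (board : List (List String)) (removed : List (List Int)) (i : Int)
    (idx1 : Int) (idx2 : Int) (nb : List (List String)) : List (List String) :=
  if h : 0 ≤ idx1 then
    if PySem.List.pyGetD (PySem.List.pyGetD removed idx1 []) i 0 = 0 then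
      aWhile board removed i (idx1 - 1) (idx2 - 1)
        (PySem.List.pySetD nb idx2
          (PySem.List.pySetD (PySem.List.pyGetD nb idx2 []) i
            (PySem.List.pyGetD (PySem.List.pyGetD board idx1 []) i "0")))
    else aWhile board removed i (idx1 - 1) idx2 nb
  else nb
termination_by (idx1 + 1).toNat
decreasing_by all_goals omega

def remake_board (m : Int) (n : Int) (board : List (List String)) (removed : List (List Int)) : List (List String) :=
  let new_board := (PySem.List.pyRange 0 m 1).map (fun _ => List.replicate n.toNat "0")
  (PySem.List.pyRange 0 n 1).foldl (fun nb i => aWhile board removed i (m - 1) (m - 1) nb) new_board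

-- ===== PORT B =====
def remake_board_alt (m : Int) (n : Int) (board : List (List String)) (removed : List (List Int)) : List (List String) :=
  let cols := (PySem.List.pyRange 0 n 1).map (fun col =>
    let kept := (PySem.List.pyRange 0 m 1).filterMap (fun i =>
      if PySem.List.pyGetD (PySem.List.pyGetD removed i []) col 0 = 0 then
        some (PySem.List.pyGetD (PySem.List.pyGetD board i []) col "0")
      else none)
    List.replicate (m - (kept.length : Int)).toNat "0" ++ kept)
  (PySem.List.pyRange 0 m 1).map (fun i =>
    (PySem.List.pyRange 0 n 1).map (fun j =>
      PySem.List.pyGetD (PySem.List.pyGetD cols j []) i "0"))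

-- ===== PRECONDITION & SPEC =====
-- Pre_ excludes exactly the inputs on which Python A raises IndexError: some needed cell
-- removed[r][c] (r<m, c<n) is missing, or a surviving cell board[r][c] is missing.
def Pre_remake_board (m : Int) (n : Int) (board : List (List String)) (removed : List (List Int)) : Prop :=
  n.toNat = 0 ∨
    (m.toNat ≤ removed.length ∧
      ∀ r < m.toNat,
        (n.toNat ≤ (removed.getD r []).length ∧
          ∀ c < n.toNat,
            ((removed.getD r []).getD c 0 = 0 → r < board.length ∧ c < (board.getD r []).length)))
instance (m : Int) (n : Int) (board : List (List String)) (removed : List (List Int)) : Decidable (Pre_remake_board m n board removed) := by unfold Pre_remake_board; infer_instance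

def pvWitness_remake_board : Int × Int × List (List String) × List (List Int) :=
  (2, 2, [["a", "b"], ["c", "d"]], [[0, 1], [1, 0]])

def Spec_remake_board (m : Int) (n : Int) (board : List (List String)) (removed : List (List Int)) (out : List (List String)) : Prop := out = remake_board_alt m n board removed
instance (m : Int) (n : Int) (board : List (List String)) (removed : List (List Int)) (out : List (List String)) : Decidable (Spec_remake_board m n board removed out) := by unfold Spec_remake_board; infer_instance

-- ===== CLAIM (what is proved, stated in full; the proofs are below) =====
def Claim_equal_remake_board : Prop := ∀ (m : Int) (n : Int) (board : List (List String)) (removed : List (List Int)), Dom_remake_board m n board removed → Pre_remake_board m n board removed → Spec_remake_board m n board removed (remake_board m n board removed)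

-- ===== LEMMAS AND PROOFS =====

-- survivors of column c among rows 0..t-1, top-to-bottom
def kc (board : List (List String)) (removed : List (List Int)) (c : Nat) (t : Nat) : List String :=
  (List.range t).filterMap (fun r =>
    if (removed.getD r []).getD c 0 = 0 then some ((board.getD r []).getD c "0") else none)

def colOf (nb : List (List String)) (c : Nat) : List String := nb.map (fun row => row.getD c "0")

theorem kc_succ (board : List (List String)) (removed : List (List Int)) (c t : Nat) :
    kc board removed c (t + 1)
      = kc board removed c t ++ (if (removed.getD t []).getD c 0 = 0 then [((board.getD t []).getD c "0")] else []) := by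
  simp only [kc, List.range_succ, List.filterMap_append]
  split <;> simp_all [List.getD_eq_getElem?_getD]

theorem kc_len_le (board : List (List String)) (removed : List (List Int)) (c t : Nat) :
    (kc board removed c t).length ≤ t := by
  simpa using List.length_filterMap_le _ (List.range t)

theorem aWhile_stop (board : List (List String)) (removed : List (List Int)) (i idx1 idx2 : Int)
    (nb : List (List String)) (h : idx1 < 0) : aWhile board removed i idx1 idx2 nb = nb := by
  rw [aWhile]; simp [show ¬ (0 ≤ idx1) by omega]

theorem aWhile_invariant (board : List (List String)) (removed : List (List Int)) (c : Nat) :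
    ∀ (t : Nat) (d : Int) (nb : List (List String)),
      ((kc board removed c t).length : Int) ≤ d + 1 → d < (nb.length : Int) →
      (∀ row ∈ nb, c < row.length) →
      (aWhile board removed (c : Int) ((t : Int) - 1) d nb).map (·.length) = nb.map (·.length)
      ∧ (∀ c' : Nat, c' ≠ c →
          colOf (aWhile board removed (c : Int) ((t : Int) - 1) d nb) c' = colOf nb c')
      ∧ colOf (aWhile board removed (c : Int) ((t : Int) - 1) d nb) c
          = (colOf nb c).take (d + 1 - (kc board removed c t).length).toNat
            ++ kc board removed c t ++ (colOf nb c).drop (d + 1).toNat := by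
  intro t
  induction t with
  | zero =>
    intro d nb h1 h2 h3
    rw [show ((0 : Nat) : Int) - 1 = -1 by norm_num,
      aWhile_stop board removed _ _ _ _ (by norm_num)]
    refine ⟨rfl, fun c' _ => rfl, ?_⟩
    simp only [kc, List.range_zero, List.filterMap_nil, List.length_nil,
      List.append_nil, Nat.cast_zero, Int.sub_zero]
    exact (List.take_append_drop _ _).symm
  | succ t ih =>
    intro d nb h1 h2 h3
    have hclen : (kc board removed c (t + 1)).length ≤ t + 1 := kc_len_le board removed c (t + 1)
    rw [show ((t + 1 : Nat) : Int) - 1 = (t : Int) by push_cast; ring, aWhile,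
      dif_pos (Int.natCast_nonneg t)]
    simp only [PySem.List.pyGetD_natCast]
    by_cases hR : (removed.getD t []).getD c 0 = 0
    · -- row t survives: one write at position d, then recurse at d-1
      simp only [if_pos hR]
      have hkc : kc board removed c (t + 1) = kc board removed c t
          ++ [((board.getD t []).getD c "0")] := by
        rw [kc_succ, if_pos hR]
      have hs1 : ((kc board removed c t).length : Int) + 1 ≤ d + 1 := by
        rw [hkc] at h1; simp at h1; omega
      have hd0 : 0 ≤ d := by
        have := Int.natCast_nonneg (kc board removed c t).length; omega
      have hdlt : d.toNat < nb.length := by omega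
      set v := (board.getD t []).getD c "0" with hv
      set row := nb[d.toNat] with hrow
      have hget : PySem.List.pyGetD nb d [] = row := by
        rw [PySem.List.pyGetD_eq_getElem nb [] hd0 (by exact_mod_cast h2)]
      have hcrow : c < row.length := h3 row (List.getElem_mem hdlt)
      have hrow' : PySem.List.pySetD row (c : Int) v = row.set c v :=
        PySem.List.pySetD_natCast row c v
      have hset : PySem.List.pySetD nb d (PySem.List.pySetD (PySem.List.pyGetD nb d []) (c : Int) v)
          = nb.set d.toNat (row.set c v) := by
        rw [hget, hrow', PySem.List.pySetD_of_nonneg nb _ hd0]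
      rw [hset]
      set nb' := nb.set d.toNat (row.set c v) with hnb'
      have hmapb : d.toNat < (nb.map (fun r => r.length)).length := by
        simpa using hdlt
      have hlen' : nb'.map (·.length) = nb.map (·.length) := by
        rw [hnb', List.map_set]
        have h5 : (row.set c v).length = (nb.map (fun r => r.length))[d.toNat]'hmapb := by
          rw [List.length_set, List.getElem_map, hrow]
        rw [h5, List.set_getElem_self]
      have hlenlen : nb'.length = nb.length := by rw [hnb', List.length_set]
      have hcolne : ∀ c' : Nat, c' ≠ c → colOf nb' c' = colOf nb c' := by
        intro c' hne
        have hb : d.toNat < (List.map (fun r => r.getD c' "0") nb).length := by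
          simpa using hdlt
        rw [hnb', colOf, List.map_set]
        have h5 : (row.set c v).getD c' "0"
            = (List.map (fun r => r.getD c' "0") nb)[d.toNat]'hb := by
          rw [List.getElem_map, ← hrow, List.getD_eq_getElem?_getD,
            List.getD_eq_getElem?_getD, List.getElem?_set,
            if_neg (fun h => hne (Eq.symm h))]
        rw [h5, List.set_getElem_self]; rfl
      have hcoleq : colOf nb' c = (colOf nb c).set d.toNat v := by
        rw [hnb', colOf, List.map_set]
        have h5 : (row.set c v).getD c "0" = v := by
          rw [List.getD_eq_getElem?_getD, List.getElem?_set, if_pos rfl,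
            if_pos (by simpa using hcrow)]
          rfl
        rw [h5]; rfl
      have h3' : ∀ r ∈ nb', c < r.length := by
        intro r hr
        rcases List.mem_or_eq_of_mem_set hr with h | h
        · exact h3 r h
        · rw [h, List.length_set]; exact hcrow
      obtain ⟨ih1, ih2, ih3⟩ := ih (d - 1) nb'
        (by omega)
        (by rw [hlenlen]; omega) h3'
      refine ⟨ih1.trans hlen', fun c' hne => (ih2 c' hne).trans (hcolne c' hne), ?_⟩
      rw [ih3, hcoleq, hkc]
      have hLlen : d.toNat < (colOf nb c).length := by simp [colOf]; omega
      set L := colOf nb c with hL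
      set s := (kc board removed c t).length with hsdef
      have e1 : (d - 1 + 1 - (s : Int)).toNat = (d - s).toNat := by omega
      have e2 : (d - (s : Int)).toNat ≤ d.toNat := by omega
      have e3 : (L.set d.toNat v).take (d - (s : Int)).toNat = L.take (d - (s : Int)).toNat :=
        List.take_set_of_le e2
      have e4 : (L.set d.toNat v).drop d.toNat = v :: L.drop (d.toNat + 1) := by
        rw [List.set_eq_take_append_cons_drop, if_pos hLlen,
          List.drop_append_of_le_length (by simp [List.length_take]; omega)]
        rw [List.drop_eq_nil_of_le (by simp), List.nil_append]
      have e5 : (d - 1 + 1).toNat = d.toNat := by omega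
      have e6 : ((d : Int) + 1 - ((s : Int) + 1)).toNat = (d - s).toNat := by omega
      have e7 : ((d : Int) + 1).toNat = d.toNat + 1 := by omega
      rw [e1, e5, e3, e4]
      push_cast [List.length_append, List.length_singleton]
      rw [e6, e7]
      simp
    · -- row t removed: no write
      simp only [if_neg hR]
      have hkc : kc board removed c (t + 1) = kc board removed c t := by
        rw [kc_succ, if_neg hR]; simp
      rw [hkc] at h1 ⊢
      exact ih d nb h1 h2 h3

def modelCol (board : List (List String)) (removed : List (List Int)) (m : Int) (c : Nat) : List String :=
  List.replicate (m.toNat - (kc board removed c m.toNat).length) "0" ++ kc board removed c m.toNat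

def model (m n : Int) (board : List (List String)) (removed : List (List Int)) : List (List String) :=
  (List.range m.toNat).map (fun r => (List.range n.toNat).map (fun c => (modelCol board removed m c).getD r "0"))

theorem modelCol_length (board : List (List String)) (removed : List (List Int)) (m : Int) (c : Nat) :
    (modelCol board removed m c).length = m.toNat := by
  have := kc_len_le board removed c m.toNat
  simp [modelCol]; omega

theorem getD_map_range' {α : Type} (f : Nat → α) (n j : Nat) (d : α) (h : j < n) :
    ((List.range n).map f).getD j d = f j := by
  rw [List.getD_eq_getElem?_getD, List.getElem?_map, List.getElem?_range h]
  rfl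

theorem B_eq_model (m : Int) (n : Int) (board : List (List String)) (removed : List (List Int)) :
    remake_board_alt m n board removed = model m n board removed := by
  have hrange : ∀ (x : Int), PySem.List.pyRange 0 x 1 = (List.range x.toNat).map (fun k : Nat => (k : Int)) := by
    intro x; rw [PySem.List.pyRange_one]; simp
  unfold remake_board_alt model
  rw [hrange m, hrange n]
  simp only [List.map_map, List.filterMap_map, Function.comp_def, PySem.List.pyGetD_natCast]
  apply List.map_congr_left
  intro r hr
  apply List.map_congr_left
  intro j hj
  rw [List.mem_range] at hr hj
  rw [getD_map_range' _ _ _ _ hj]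
  have hkle := kc_len_le board removed j m.toNat
  have htn : (m - ((kc board removed j m.toNat).length : Int)).toNat
      = m.toNat - (kc board removed j m.toNat).length := by omega
  show (List.replicate (m - ((kc board removed j m.toNat).length : Int)).toNat "0"
      ++ kc board removed j m.toNat).getD r "0" = (modelCol board removed m j).getD r "0"
  rw [htn]
  rfl

theorem foldl_id {α β : Type} (f : α → β → α) (l : List β) (x : α)
    (h : ∀ a b, f a b = a) : l.foldl f x = x := by
  induction l generalizing x with
  | nil => rfl
  | cons b l ih => rw [List.foldl_cons, h, ih]

theorem A_phase (board : List (List String)) (removed : List (List Int)) (m n : Int)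
    (hm : 0 ≤ m) :
    ∀ K : Nat, K ≤ n.toNat →
      ((List.range K).foldl (fun nb (c : Nat) => aWhile board removed (c : Int) (m - 1) (m - 1) nb)
          (List.replicate m.toNat (List.replicate n.toNat "0"))).map (·.length)
        = List.replicate m.toNat n.toNat
      ∧ ∀ c : Nat,
          colOf ((List.range K).foldl (fun nb (c : Nat) => aWhile board removed (c : Int) (m - 1) (m - 1) nb)
            (List.replicate m.toNat (List.replicate n.toNat "0"))) c
          = if c < K then modelCol board removed m c else List.replicate m.toNat "0" := by
  intro K
  induction K with
  | zero =>
    intro _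
    refine ⟨by simp, fun c => ?_⟩
    simp [colOf, List.map_replicate]
  | succ K ih =>
    intro hK
    obtain ⟨ih1, ih2⟩ := ih (by omega)
    set F := (List.range K).foldl (fun nb (c : Nat) => aWhile board removed (c : Int) (m - 1) (m - 1) nb)
      (List.replicate m.toNat (List.replicate n.toNat "0")) with hF
    have hFlen : F.length = m.toNat := by
      have := congrArg List.length ih1
      simpa using this
    have hrowlen : ∀ row ∈ F, row.length = n.toNat := by
      intro row hrow
      have : row.length ∈ F.map (·.length) := List.mem_map_of_mem hrow
      rw [ih1] at this
      exact List.eq_of_mem_replicate this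
    have hKN : K < n.toNat := by omega
    have inv := aWhile_invariant board removed K m.toNat (m - 1) F
      (by have := kc_len_le board removed K m.toNat; omega)
      (by rw [hFlen]; omega)
      (fun row hrow => by rw [hrowlen row hrow]; exact hKN)
    rw [show ((m.toNat : Int) - 1) = m - 1 by omega] at inv
    obtain ⟨inv1, inv2, inv3⟩ := inv
    rw [List.range_succ, List.foldl_append, List.foldl_cons, List.foldl_nil, ← hF]
    refine ⟨inv1.trans ih1, fun c => ?_⟩
    by_cases hc : c = K
    · subst hc
      rw [inv3, ih2 c, if_neg (by omega), if_pos (by omega)]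
      have hs := kc_len_le board removed c m.toNat
      rw [List.take_replicate, List.drop_replicate, modelCol,
        show min (m - 1 + 1 - ((kc board removed c m.toNat).length : Int)).toNat m.toNat
          = m.toNat - (kc board removed c m.toNat).length by omega,
        show m.toNat - (m - 1 + 1).toNat = 0 by omega]
      simp
    · rw [inv2 c hc, ih2 c]
      by_cases h2 : c < K
      · rw [if_pos h2, if_pos (by omega)]
      · rw [if_neg h2, if_neg (by omega)]

theorem A_eq_model (m : Int) (n : Int) (board : List (List String)) (removed : List (List Int)) :
    remake_board m n board removed = model m n board removed := by
  have hrange : ∀ (x : Int), PySem.List.pyRange 0 x 1 = (List.range x.toNat).map (fun k : Nat => (k : Int)) := by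
    intro x; rw [PySem.List.pyRange_one]; simp
  by_cases hm : 0 ≤ m
  · unfold remake_board
    rw [hrange m, hrange n, List.foldl_map, List.map_map]
    have hnb0 : (List.range m.toNat).map ((fun _ => List.replicate n.toNat "0") ∘ (fun k : Nat => (k : Int)))
        = List.replicate m.toNat (List.replicate n.toNat "0") := by
      simp [Function.comp_def, List.map_const', List.length_range]
    rw [hnb0]
    obtain ⟨p1, p2⟩ := A_phase board removed m n hm n.toNat (le_refl _)
    set F := (List.range n.toNat).foldl (fun nb (c : Nat) => aWhile board removed (c : Int) (m - 1) (m - 1) nb)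
      (List.replicate m.toNat (List.replicate n.toNat "0")) with hF
    show F = model m n board removed
    have hFlen : F.length = m.toNat := by
      have := congrArg List.length p1
      simpa using this
    have hrowlen : ∀ row ∈ F, row.length = n.toNat := by
      intro row hrow
      have : row.length ∈ F.map (·.length) := List.mem_map_of_mem hrow
      rw [p1] at this
      exact List.eq_of_mem_replicate this
    apply List.ext_getElem (by simp [model, hFlen])
    intro r h1 h2
    have hrM : r < m.toNat := by rwa [hFlen] at h1
    have hmodr : (model m n board removed)[r] =
        (List.range n.toNat).map (fun c => (modelCol board removed m c).getD r "0") := by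
      simp [model]
    rw [hmodr]
    apply List.ext_getElem (by simp [hrowlen F[r] (List.getElem_mem h1)])
    intro j hj1 hj2
    have hjN : j < n.toNat := by simpa using hj2
    have hcol := p2 j
    rw [if_pos hjN] at hcol
    have hget1 : F[r][j] = (colOf F j)[r]'(by simp [colOf]; omega) := by
      simp only [colOf, List.getElem_map]
      rw [List.getD_eq_getElem?_getD,
        List.getElem?_eq_getElem (by rw [hrowlen F[r] (List.getElem_mem h1)]; exact hjN)]
      rfl
    rw [hget1]
    have hmlen : r < (modelCol board removed m j).length := by
      rw [modelCol_length]; exact hrM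
    have hget2 : (colOf F j)[r]'(by simp [colOf]; omega) = (modelCol board removed m j)[r]'hmlen := by
      simp only [hcol]
    rw [hget2, List.getElem_map, List.getElem_range]
    rw [List.getD_eq_getElem?_getD, List.getElem?_eq_getElem hmlen]
    rfl
  · have hm0 : m.toNat = 0 := by omega
    unfold remake_board model
    rw [hm0]
    simp only [List.range_zero, List.map_nil]
    have hnil : PySem.List.pyRange 0 m 1 = [] := by
      rw [hrange m, hm0]
      simp
    rw [hnil]
    simp only [List.map_nil]
    apply foldl_id
    intro a b
    apply aWhile_stop
    omega

-- ===== VERDICT (by name: the statement is the Claim_ definition above) =====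
theorem remake_board_spec : Claim_equal_remake_board := by
  intro m n board removed _ _
  unfold Spec_remake_board
  rw [A_eq_model, B_eq_model]
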